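-- pv_equiv track=rewrite | github.com/laboo/blessedblocks | blessedblocks/grid.py | divvy
-- ===== SOURCE A (Python) =====
-- def divvy(plots, x, y, width, height, horizontal):
--     def calc_block_size(total_size, num_blocks, block_index):
--         rem = total_size % num_blocks
--         base = total_size // num_blocks
--         return base + int(block_index < rem)
--
--     def calc_block_offset(orig_offset, total_size, num_blocks, block_index):
--         offset = orig_offset
--         for i in range(0, block_index):
--             offset += calc_block_size(total_size, num_blocks, i)
--         return offset
--     out = []
--     for i, plot in enumerate(plots):
--         if horizontal:
--             new_w = calc_block_size(width, len(plots), i)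
--             new_h = height
--             new_x = calc_block_offset(x, width, len(plots), i)
--             new_y = y
--         else:
--             new_w = width
--             new_h = calc_block_size(height, len(plots), i)
--             new_x = x
--             new_y = calc_block_offset(y, height, len(plots), i)
--         out.append((plot, new_x, new_y, new_w, new_h))
--     return out
-- ===== SOURCE B (Python) =====
-- def divvy(plots, x, y, width, height, horizontal):
--     n = len(plots)
--     if n == 0:
--         return []
--     size = width if horizontal else height
--     base, rem = divmod(size, n)
--     orig = x if horizontal else y
--     out = []
--     for i, plot in enumerate(plots):
--         sz = base + (1 if i < rem else 0)
--         off = orig + i * base + min(i, rem)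
--         if horizontal:
--             out.append((plot, off, y, sz, height))
--         else:
--             out.append((plot, x, off, width, sz))
--     return out
-- ===== Notes on version B (the rewrite author's own statement) =====
-- stated objective: faster
-- what changed: B computes each block's offset with the closed form orig + i*base + min(i, rem) from a single divmod, removing A's per-block inner loop that re-sums all previous block sizes.
import Mathlib
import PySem

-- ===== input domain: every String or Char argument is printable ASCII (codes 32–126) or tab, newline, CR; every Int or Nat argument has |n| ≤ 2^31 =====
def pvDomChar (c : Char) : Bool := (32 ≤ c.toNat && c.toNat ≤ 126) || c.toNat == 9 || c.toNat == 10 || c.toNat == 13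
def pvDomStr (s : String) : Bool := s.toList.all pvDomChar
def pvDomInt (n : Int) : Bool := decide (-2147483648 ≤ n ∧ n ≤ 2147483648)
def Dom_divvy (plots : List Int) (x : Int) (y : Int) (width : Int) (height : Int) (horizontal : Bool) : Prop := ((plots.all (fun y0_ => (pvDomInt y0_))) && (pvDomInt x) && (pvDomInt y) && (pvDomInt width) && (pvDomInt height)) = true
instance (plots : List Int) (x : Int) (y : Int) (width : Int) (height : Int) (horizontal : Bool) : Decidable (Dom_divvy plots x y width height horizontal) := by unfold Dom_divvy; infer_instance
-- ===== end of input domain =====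

-- B replaces A's quadratic offset re-summation by a closed-form offset from one divmod (return value only; no mutation).

-- ===== PORT A =====
-- helper calc_block_size of A
def pvCalcBlockSize (total_size num_blocks block_index : Int) : Int :=
  let rem := PySem.Int.mod total_size num_blocks
  let base := PySem.Int.floordiv total_size num_blocks
  base + (if block_index < rem then 1 else 0)

-- helper calc_block_offset of A: loops over range(0, block_index) re-summing block sizes
def pvCalcBlockOffset (orig_offset total_size num_blocks block_index : Int) : Int :=
  (PySem.List.pyRange 0 block_index 1).foldl
    (fun off i => off + pvCalcBlockSize total_size num_blocks i) orig_offset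

def divvy (plots : List Int) (x : Int) (y : Int) (width : Int) (height : Int) (horizontal : Bool) : List (Int × Int × Int × Int × Int) :=
  (PySem.List.enumerate plots 0).map (fun ip =>
    let i := ip.1
    let plot := ip.2
    if horizontal then
      (plot, pvCalcBlockOffset x width (plots.length : Int) i, y,
       pvCalcBlockSize width (plots.length : Int) i, height)
    else
      (plot, x, pvCalcBlockOffset y height (plots.length : Int) i, width,
       pvCalcBlockSize height (plots.length : Int) i))

-- ===== PORT B =====
def divvy_alt (plots : List Int) (x : Int) (y : Int) (width : Int) (height : Int) (horizontal : Bool) : List (Int × Int × Int × Int × Int) :=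
  if plots.length = 0 then []
  else
    let n : Int := (plots.length : Int)
    let size := if horizontal then width else height
    let base := PySem.Int.floordiv size n
    let rem := PySem.Int.mod size n
    let orig := if horizontal then x else y
    (PySem.List.enumerate plots 0).map (fun ip =>
      let sz := base + (if ip.1 < rem then 1 else 0)
      let off := orig + ip.1 * base + min ip.1 rem
      if horizontal then (ip.2, off, y, sz, height) else (ip.2, x, off, width, sz))

-- ===== PRECONDITION & SPEC =====
def Spec_divvy (plots : List Int) (x : Int) (y : Int) (width : Int) (height : Int) (horizontal : Bool) (out : List (Int × Int × Int × Int × Int)) : Prop := out = divvy_alt plots x y width height horizontal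
instance (plots : List Int) (x : Int) (y : Int) (width : Int) (height : Int) (horizontal : Bool) (out : List (Int × Int × Int × Int × Int)) : Decidable (Spec_divvy plots x y width height horizontal out) := by unfold Spec_divvy; infer_instance

-- ===== CLAIM (what is proved, stated in full; the proofs are below) =====
def Claim_equal_divvy : Prop := ∀ (plots : List Int) (x : Int) (y : Int) (width : Int) (height : Int) (horizontal : Bool), Dom_divvy plots x y width height horizontal → Spec_divvy plots x y width height horizontal (divvy plots x y width height horizontal)

-- ===== LEMMAS AND PROOFS =====

-- Closed form for A's offset loop, for a natural-number block index and a positive divisor.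
theorem pvOffset_closed (orig total n : Int) (hn : 0 < n) (k : Nat) :
    pvCalcBlockOffset orig total n (k : Int)
      = orig + (k : Int) * PySem.Int.floordiv total n + min (k : Int) (PySem.Int.mod total n) := by
  have hrem : 0 ≤ PySem.Int.mod total n := PySem.Int.mod_nonneg total hn
  induction k with
  | zero =>
      simp [pvCalcBlockOffset, PySem.List.pyRange_one_eq_nil (le_refl (0:Int))]
      omega
  | succ m ih =>
      have hcast : ((m+1 : Nat) : Int) = (m : Int) + 1 := by push_cast; ring
      unfold pvCalcBlockOffset at ih ⊢
      rw [hcast, PySem.List.pyRange_one_succ_right (by positivity), List.foldl_append, ih]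
      simp only [List.foldl_cons, List.foldl_nil, pvCalcBlockSize]
      rw [show ((m:Int)+1) * PySem.Int.floordiv total n
            = (m:Int) * PySem.Int.floordiv total n + PySem.Int.floordiv total n by ring]
      split_ifs with h <;> omega

-- Per-element agreement, then map congruence.
theorem divvy_eq_alt (plots : List Int) (x y width height : Int) (horizontal : Bool) :
    divvy plots x y width height horizontal = divvy_alt plots x y width height horizontal := by
  by_cases hne : plots.length = 0
  · have : plots = [] := List.length_eq_zero_iff.1 hne
    subst this; rfl
  · have hn : 0 < (plots.length : Int) := by
      have := Nat.pos_of_ne_zero hne; omega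
    unfold divvy divvy_alt
    simp only [if_neg hne]
    apply List.map_congr_left
    intro p hp
    rcases (PySem.List.mem_enumerate_iff plots 0 p).1 hp with ⟨k, hk, rfl⟩
    simp only [zero_add]
    cases horizontal <;>
      simp only [Bool.false_eq_true, if_true, if_false,
        pvOffset_closed _ _ _ hn k, pvCalcBlockSize]

-- ===== VERDICT (by name: the statement is the Claim_ definition above) =====
theorem divvy_spec : Claim_equal_divvy := by
  intro plots x y width height horizontal _
  unfold Spec_divvy
  exact divvy_eq_alt plots x y width height horizontal
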